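-- pv_equiv track=rewrite | github.com/olegbrz/AoC | AOC-2015-01.py | get_negative_floor
-- ===== SOURCE A (Python) =====
-- def get_negative_floor(data: str) -> int:
--     floor = 0
--     for instruction in range(len(data)):
--         if data[instruction] == "(":
--             floor += 1
--         else:
--             floor -= 1
--         if floor < 0:
--             return instruction + 1
-- ===== SOURCE B (Python) =====
-- def get_negative_floor(data: str):
--     # Build the full table of running floor values, then scan it.
--     sums = []
--     total = 0
--     for ch in data:
--         total += 1 if ch == "(" else -1
--         sums.append(total)
--     for i, v in enumerate(sums):
--         if v < 0:
--             return i + 1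
--     return None
-- ===== Notes on version B (the rewrite author's own statement) =====
-- stated objective: alternative
-- what changed: B materializes the full prefix-sum table of floor values in one pass, then scans that table for the first negative entry, instead of A's single fused loop with an early return.
import Mathlib
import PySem

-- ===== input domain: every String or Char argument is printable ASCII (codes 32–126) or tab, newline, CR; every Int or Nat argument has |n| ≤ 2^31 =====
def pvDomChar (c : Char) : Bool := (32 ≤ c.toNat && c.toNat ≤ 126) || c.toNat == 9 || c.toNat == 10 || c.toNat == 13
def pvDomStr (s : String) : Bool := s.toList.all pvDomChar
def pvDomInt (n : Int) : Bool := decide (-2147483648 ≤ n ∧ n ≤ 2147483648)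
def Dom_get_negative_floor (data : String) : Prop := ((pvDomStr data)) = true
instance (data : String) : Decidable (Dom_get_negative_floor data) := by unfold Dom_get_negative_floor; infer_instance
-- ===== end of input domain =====

-- B builds the whole prefix-sum table first and then scans it; A fuses both into one early-return loop. Same value everywhere.

-- ===== PORT A =====
-- fused loop: update floor per char, return index+1 as soon as floor < 0
def pvGoA : List Char → Int → Int → Option Int
  | [], _, _ => none
  | c :: rest, floor, i =>
    let f := if c = '(' then floor + 1 else floor - 1
    if f < 0 then some (i + 1) else pvGoA rest f (i + 1)

def get_negative_floor (data : String) : Option Int :=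
  pvGoA data.toList 0 0

-- ===== PORT B =====
-- pass 1: cumulative sums of the ±1 deltas
def pvAccumB : Int → List Int → List Int
  | _, [] => []
  | t, d :: ds => (t + d) :: pvAccumB (t + d) ds

-- pass 2: scan the table for the first negative value
def pvScanB : List Int → Int → Option Int
  | [], _ => none
  | v :: vs, i => if v < 0 then some (i + 1) else pvScanB vs (i + 1)

def get_negative_floor_alt (data : String) : Option Int :=
  let deltas := data.toList.map (fun c => if c = '(' then (1 : Int) else -1)
  pvScanB (pvAccumB 0 deltas) 0

-- ===== PRECONDITION & SPEC =====
def Spec_get_negative_floor (data : String) (out : Option Int) : Prop := out = get_negative_floor_alt data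
instance (data : String) (out : Option Int) : Decidable (Spec_get_negative_floor data out) := by unfold Spec_get_negative_floor; infer_instance

-- ===== CLAIM (what is proved, stated in full; the proofs are below) =====
def Claim_equal_get_negative_floor : Prop := ∀ (data : String), Dom_get_negative_floor data → Spec_get_negative_floor data (get_negative_floor data)

-- ===== LEMMAS AND PROOFS =====
lemma pvGoA_eq_scan_accum (cs : List Char) (floor i : Int) :
    pvGoA cs floor i =
      pvScanB (pvAccumB floor (cs.map (fun c => if c = '(' then (1 : Int) else -1))) i := by
  induction cs generalizing floor i with
  | nil => simp [pvGoA, pvAccumB, pvScanB]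
  | cons c rest ih =>
    simp only [List.map_cons, pvGoA, pvAccumB, pvScanB]
    by_cases hc : c = '('
    · simp [hc, ih]
    · simp only [if_neg hc, show floor + (-1 : Int) = floor - 1 from by ring, ih]

-- ===== VERDICT (by name: the statement is the Claim_ definition above) =====
theorem get_negative_floor_spec : Claim_equal_get_negative_floor := by
  intro data _
  unfold Spec_get_negative_floor get_negative_floor get_negative_floor_alt
  exact pvGoA_eq_scan_accum data.toList 0 0
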